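-- pv_equiv track=rewrite | github.com/AdamZhouSE/pythonHomework | Code/CodeRecords/2525/48102/250269.py | dfs
-- ===== SOURCE A (Python) =====
-- def dfs(end: int, ls: list) -> int:
--     res = []
--     for i in range(len(ls)):
--         temp = 0
--         if ls[i][0] >= end:
--             temp += ls[i][2]
--             temp += dfs(ls[i][1], ls[i+1:])
--             res.append(temp)
--     if len(res) == 0:
--         return 0
--     else:
--         return max(res)
-- ===== SOURCE B (Python) =====
-- def dfs(end: int, ls: list) -> int:
--     # suffix DP: v[i] = best total weight of a chain starting with interval i
--     n = len(ls)
--     v = [0] * n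
--     for i in range(n - 1, -1, -1):
--         cand = [v[j] for j in range(i + 1, n) if ls[j][0] >= ls[i][1]]
--         v[i] = ls[i][2] + (max(cand) if cand else 0)
--     cand = [v[i] for i in range(n) if ls[i][0] >= end]
--     return max(cand) if cand else 0
-- ===== Notes on version B (the rewrite author's own statement) =====
-- stated objective: alternative
-- what changed: Replaces A's recursion over all compatible chain extensions by a back-to-front suffix DP that computes, for each index, the best chain value starting there, then takes the max over entries compatible with end.
-- outside the precondition, e.g. on dfs(0, [[-1]]): A returns 0, B raises IndexError
import Mathlib
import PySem

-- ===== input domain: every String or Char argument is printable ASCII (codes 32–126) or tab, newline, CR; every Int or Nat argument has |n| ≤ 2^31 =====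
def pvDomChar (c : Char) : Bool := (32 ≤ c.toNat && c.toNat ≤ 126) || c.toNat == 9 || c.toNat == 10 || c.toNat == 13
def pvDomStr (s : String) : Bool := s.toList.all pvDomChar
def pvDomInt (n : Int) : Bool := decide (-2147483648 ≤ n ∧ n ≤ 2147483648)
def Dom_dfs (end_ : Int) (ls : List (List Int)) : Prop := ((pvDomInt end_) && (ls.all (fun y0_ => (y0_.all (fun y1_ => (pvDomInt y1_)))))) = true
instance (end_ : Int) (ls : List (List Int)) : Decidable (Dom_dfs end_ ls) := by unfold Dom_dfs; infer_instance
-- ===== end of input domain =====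

-- B replaces A's recursion over chain extensions by a back-to-front suffix DP (alternative algorithm).

-- ===== PORT A =====
-- A's loop body appends 'ls[i][2] + dfs(ls[i][1], ls[i+1:])' for each eligible i;
-- ported as the mutual recursion dfs / dfsResA (dfsResA builds the 'res' list).
mutual
def dfs (end_ : Int) (ls : List (List Int)) : Int :=
  let res := dfsResA end_ ls
  if res.isEmpty then 0 else (PySem.List.max? res (fun y => y)).getD 0
  termination_by (ls.length, 1)
def dfsResA (end_ : Int) (ls : List (List Int)) : List Int :=
  match ls with
  | [] => []
  | x :: rest =>
    (if PySem.List.pyGetD x 0 0 ≥ end_ then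
       [PySem.List.pyGetD x 2 0 + dfs (PySem.List.pyGetD x 1 0) rest]
     else []) ++ dfsResA end_ rest
  termination_by (ls.length, 0)
end

-- ===== PORT B =====
-- Source B's '[v[j] for j ... if ls[j][0] >= e]' over the suffix paired with its v-values
def pickB (e : Int) (rows : List (List Int × Int)) : List Int :=
  match rows with
  | [] => []
  | (x, v) :: rest => (if PySem.List.pyGetD x 0 0 ≥ e then [v] else []) ++ pickB e rest

-- Source B's backward fill of v: v[i] = ls[i][2] + (max(cand) if cand else 0)
def bestB (ls : List (List Int)) : List Int :=
  match ls with
  | [] => []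
  | x :: rest =>
    let vrest := bestB rest
    let cand := pickB (PySem.List.pyGetD x 1 0) (rest.zip vrest)
    (PySem.List.pyGetD x 2 0 +
      (if cand.isEmpty then 0 else (PySem.List.max? cand (fun y => y)).getD 0)) :: vrest

def dfs_alt (end_ : Int) (ls : List (List Int)) : Int :=
  let cand := pickB end_ (ls.zip (bestB ls))
  if cand.isEmpty then 0 else (PySem.List.max? cand (fun y => y)).getD 0

-- ===== PRECONDITION & SPEC =====
-- Pre_ excludes lists containing a row with fewer than 3 entries: on such rows the Python A
-- raises IndexError whenever the row is reached/eligible, and B's DP (which reads every row's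
-- indices 0,1,2) raises IndexError on every such list.  (Pre_ is slightly narrower than A's
-- exact return domain: A returns 0 on e.g. (0, [[-1]]) where the short row is never eligible.)
def Pre_dfs (end_ : Int) (ls : List (List Int)) : Prop := ∀ r ∈ ls, 3 ≤ r.length
instance (end_ : Int) (ls : List (List Int)) : Decidable (Pre_dfs end_ ls) := by
  unfold Pre_dfs; infer_instance
def pvWitness_dfs : Int × List (List Int) := (0, [[0, 2, 5], [2, 4, 7]])
def Spec_dfs (end_ : Int) (ls : List (List Int)) (out : Int) : Prop := out = dfs_alt end_ ls
instance (end_ : Int) (ls : List (List Int)) (out : Int) : Decidable (Spec_dfs end_ ls out) := by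
  unfold Spec_dfs; infer_instance

-- ===== CLAIM (what is proved, stated in full; the proofs are below) =====
def Claim_equal_dfs : Prop := ∀ (end_ : Int) (ls : List (List Int)), Dom_dfs end_ ls → Pre_dfs end_ ls → Spec_dfs end_ ls (dfs end_ ls)

-- ===== LEMMAS AND PROOFS =====
lemma resA_eq_pickB (ls : List (List Int)) :
    ∀ e : Int, dfsResA e ls = pickB e (ls.zip (bestB ls)) := by
  induction ls with
  | nil => intro e; simp [dfsResA, bestB, pickB]
  | cons x rest ih =>
    intro e
    rw [dfsResA]
    have hv : bestB (x :: rest) =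
        (PySem.List.pyGetD x 2 0 +
          (if (pickB (PySem.List.pyGetD x 1 0) (rest.zip (bestB rest))).isEmpty then 0
           else (PySem.List.max? (pickB (PySem.List.pyGetD x 1 0) (rest.zip (bestB rest)))
                  (fun y => y)).getD 0)) :: bestB rest := by
      rw [bestB]
    rw [hv]
    have hdfs : dfs (PySem.List.pyGetD x 1 0) rest =
        (if (pickB (PySem.List.pyGetD x 1 0) (rest.zip (bestB rest))).isEmpty then 0
         else (PySem.List.max? (pickB (PySem.List.pyGetD x 1 0) (rest.zip (bestB rest)))
                (fun y => y)).getD 0) := by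
      rw [dfs, ih (PySem.List.pyGetD x 1 0)]
    simp only [List.zip_cons_cons, pickB, hdfs, ih e]

-- ===== VERDICT (by name: the statement is the Claim_ definition above) =====
theorem dfs_spec : Claim_equal_dfs := by
  intro end_ ls _ _
  unfold Spec_dfs dfs_alt
  rw [dfs, resA_eq_pickB ls end_]
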